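-- pv_equiv track=rewrite | github.com/ssafy10-seoul-11-python-java/algorithm | SWEA3316. 동아리실 관리하기/이가영.py | calculate
-- ===== SOURCE A (Python) =====
-- MOD = 1000000007
--
-- def calculate(schedule):
--     dic = {"A": 0b0001, "B": 0b0010, "C": 0b0100, "D": 0b1000}
--     N = len(schedule)
--     dp = [[0] * 16 for _ in range(N)]
--
--
--     for day in range(0, N):
--         master = dic[schedule[day]]
--         for bit in range(1,16):
--             if day == 0: #첫날 계산
--                 if (bit & master) != 0 and (bit & 1) != 0: # 첫날 A가 있는지 관리자가 있는지 확인
--                     dp[day][bit] = 1; # 있다면 1로 할당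
--
--
--             else :
--                 if(dp[day-1][bit]!=0):
--                     for j in range(1,16):
--                         if (bit & j) != 0 and (j & master) != 0: # 전날과 겹치는 사람 없는지, 관리자가 있는지 확인
--                             dp[day][j] =(dp[day][j] + dp[day-1][bit]) % MOD;
--
--     result = sum(dp[N - 1][1:]) % MOD
--     return result
-- ===== SOURCE B (Python) =====
-- MOD = 1000000007
--
-- def calculate(schedule):
--     # Pull-style recurrence: f(day, mask) = number of valid schedules for days 0..day
--     # whose last-day member set is `mask`, computed by a memoized function.
--     if not schedule:
--         return 0
--     dic = {"A": 0b0001, "B": 0b0010, "C": 0b0100, "D": 0b1000}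
--     masters = [dic[ch] for ch in schedule]
--     memo = {}
--
--     def f(day, mask):
--         key = (day, mask)
--         if key in memo:
--             return memo[key]
--         if mask & masters[day] == 0:
--             v = 0
--         elif day == 0:
--             v = 1 if mask & 1 else 0
--         else:
--             v = sum(f(day - 1, p) for p in range(1, 16) if p & mask) % MOD
--         memo[key] = v
--         return v
--
--     # evaluate in increasing day order so the memo keeps recursion shallow
--     for day in range(len(schedule)):
--         for mask in range(1, 16):
--             f(day, mask)
--     return sum(f(len(schedule) - 1, j) for j in range(1, 16)) % MOD
-- ===== Notes on version B (the rewrite author's own statement) =====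
-- stated objective: alternative
-- what changed: Replaces A's bottom-up push-style DP table (nested loops scattering dp[day-1][bit] into dp[day][j] with a skip-if-zero guard) by a pull-style memoized function f(day, mask) that gathers its value as a sum over the previous day's masks, cached in a dict keyed by (day, mask).
-- outside the precondition, e.g. on calculate([]): A raises IndexError, B returns 0; on calculate(['X']): A raises KeyError, B raises KeyError
import Mathlib
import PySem

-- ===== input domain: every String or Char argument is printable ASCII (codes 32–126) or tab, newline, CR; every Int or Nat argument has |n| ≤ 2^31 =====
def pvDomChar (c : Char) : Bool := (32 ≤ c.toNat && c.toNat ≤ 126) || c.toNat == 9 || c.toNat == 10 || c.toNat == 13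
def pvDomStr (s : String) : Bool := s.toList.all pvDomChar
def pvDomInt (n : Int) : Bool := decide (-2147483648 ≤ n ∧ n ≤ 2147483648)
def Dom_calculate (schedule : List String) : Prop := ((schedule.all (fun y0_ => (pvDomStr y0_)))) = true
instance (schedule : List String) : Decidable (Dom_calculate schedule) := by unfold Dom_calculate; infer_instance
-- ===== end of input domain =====

-- B replaces A's push-style in-place DP table sweep by a pull-style memoized recurrence
-- evaluated per (day, mask); same asymptotic cost (objective: alternative).


-- ===== PORT A =====
def pvMOD : Int := 1000000007

-- Python 'dp[i][j]' read / 'dp[i][j] = v' write (indices in range on all uses under Pre_)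
def pvGet2 (dp : List (List Int)) (i j : Int) : Int :=
  PySem.List.pyGetD (PySem.List.pyGetD dp i []) j 0

def pvSet2 (dp : List (List Int)) (i j : Int) (v : Int) : List (List Int) :=
  PySem.List.pySetD dp i (PySem.List.pySetD (PySem.List.pyGetD dp i []) j v)

def calculate (schedule : List String) : Int :=
  let dic : PySem.Dict String Int :=
    PySem.Dict.ofList [("A", 1), ("B", 2), ("C", 4), ("D", 8)]
  let N : Int := PySem.List.len schedule
  let dp0 : List (List Int) := List.replicate N.toNat (List.replicate 16 0)
  let dp := (PySem.List.pyRange 0 N 1).foldl (fun dp day =>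
    let master : Int := dic.getD (PySem.List.pyGetD schedule day "") 0
    (PySem.List.pyRange 1 16 1).foldl (fun dp bit =>
      if day = 0 then
        if PySem.Int.band bit master ≠ 0 ∧ PySem.Int.band bit 1 ≠ 0 then
          pvSet2 dp day bit 1
        else dp
      else
        if pvGet2 dp (day - 1) bit ≠ 0 then
          (PySem.List.pyRange 1 16 1).foldl (fun dp j =>
            if PySem.Int.band bit j ≠ 0 ∧ PySem.Int.band j master ≠ 0 then
              pvSet2 dp day j (PySem.Int.mod (pvGet2 dp day j + pvGet2 dp (day - 1) bit) pvMOD)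
            else dp) dp
        else dp) dp) dp0
  PySem.Int.mod (PySem.List.slice (PySem.List.pyGetD dp (N - 1) []) (some 1) none).sum pvMOD

-- ===== PORT B =====
-- f(day, mask) of Source B; the memo dict is a pure cache, so the port is the recursion itself
def fB (masters : List Int) : Nat → Int → Int
  | 0, mask =>
      if PySem.Int.band mask (masters.getD 0 0) = 0 then 0
      else if PySem.Int.band mask 1 ≠ 0 then 1 else 0
  | d + 1, mask =>
      if PySem.Int.band mask (masters.getD (d + 1) 0) = 0 then 0
      else PySem.Int.mod
        (((PySem.List.pyRange 1 16 1).filter (fun p => decide (PySem.Int.band p mask ≠ 0))).map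
          (fB masters d)).sum pvMOD

def calculate_alt (schedule : List String) : Int :=
  if schedule.isEmpty then 0
  else
    let dic : PySem.Dict String Int :=
      PySem.Dict.ofList [("A", 1), ("B", 2), ("C", 4), ("D", 8)]
    let masters : List Int := schedule.map (fun ch => dic.getD ch 0)
    PySem.Int.mod
      ((PySem.List.pyRange 1 16 1).map (fun j => fB masters (schedule.length - 1) j)).sum pvMOD

-- ===== PRECONDITION & SPEC =====
-- Pre_ excludes exactly where Python A raises: the empty schedule (IndexError at dp[-1])
-- and any day string other than "A"/"B"/"C"/"D" (KeyError in dic).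
def Pre_calculate (schedule : List String) : Prop :=
  schedule ≠ [] ∧ ∀ s ∈ schedule, s = "A" ∨ s = "B" ∨ s = "C" ∨ s = "D"
instance (schedule : List String) : Decidable (Pre_calculate schedule) := by
  unfold Pre_calculate; infer_instance

def pvWitness_calculate : List String := ["A", "B", "A"]

def Spec_calculate (schedule : List String) (out : Int) : Prop := out = calculate_alt schedule
instance (schedule : List String) (out : Int) : Decidable (Spec_calculate schedule out) := by
  unfold Spec_calculate; infer_instance

-- ===== CLAIM (what is proved, stated in full; the proofs are below) =====
def Claim_equal_calculate : Prop :=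
  ∀ (schedule : List String), Dom_calculate schedule → Pre_calculate schedule →
    Spec_calculate schedule (calculate schedule)

-- ===== LEMMAS AND PROOFS =====
theorem pv_getD_setD_self {α : Type} (xs : List α) (i : Int) (v d : α)
    (hi : 0 ≤ i) (hil : i < xs.length) :
    PySem.List.pyGetD (PySem.List.pySetD xs i v) i d = v := by
  rw [PySem.List.pySetD_of_nonneg xs v hi]
  rw [PySem.List.pyGetD_eq_getElem _ d hi (by simpa using hil)]
  simp
theorem pv_getD_setD_ne {α : Type} (xs : List α) (i q : Int) (v d : α)
    (hi : 0 ≤ i) (hq : 0 ≤ q) (hql : q < xs.length) (hne : i ≠ q) :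
    PySem.List.pyGetD (PySem.List.pySetD xs i v) q d = PySem.List.pyGetD xs q d := by
  rw [PySem.List.pySetD_of_nonneg xs v hi]
  rw [PySem.List.pyGetD_eq_getElem _ d hq (by simpa using hql)]
  rw [PySem.List.pyGetD_eq_getElem xs d hq (by simpa using hql)]
  rw [List.getElem_set, if_neg (by omega)]

theorem pv_rowFold_set (cond : Int → Prop) [DecidablePred cond] (h : Int → Int) :
    ∀ (L : List Int), L.Nodup → (∀ x ∈ L, 0 ≤ x ∧ x < 16) →
      ∀ (row : List Int), row.length = 16 →
      (L.foldl (fun r j => if cond j then PySem.List.pySetD r j (h (PySem.List.pyGetD r j 0)) else r) row).length = 16 ∧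
      ∀ q : Int, 0 ≤ q → q < 16 →
        PySem.List.pyGetD
          (L.foldl (fun r j => if cond j then PySem.List.pySetD r j (h (PySem.List.pyGetD r j 0)) else r) row) q 0
        = if q ∈ L ∧ cond q then h (PySem.List.pyGetD row q 0) else PySem.List.pyGetD row q 0 := by
  intro L
  induction L with
  | nil => intro _ _ row hlen; simp [hlen]
  | cons j L' ih =>
    intro hnd hR row hlen
    obtain ⟨hj0, hj16⟩ := hR j (by simp)
    have hjrow : j < (row.length : Int) := by omega
    simp only [List.foldl_cons]
    have hlen' : (if cond j then PySem.List.pySetD row j (h (PySem.List.pyGetD row j 0)) else row).length = 16 := by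
      split <;> simp [PySem.List.length_pySetD, hlen]
    obtain ⟨ihL, ihE⟩ := ih (by simp_all [List.nodup_cons]) (fun x hx => hR x (by simp [hx])) _ hlen'
    refine ⟨ihL, ?_⟩
    intro q hq0 hq16
    rw [ihE q hq0 hq16]
    have hjne : j ∉ L' := (List.nodup_cons.mp hnd).1
    by_cases hqj : q = j
    · subst hqj
      have hqnL : q ∉ L' := hjne
      by_cases hcq : cond q
      · simp only [hqnL, hcq, and_true, if_false, List.mem_cons, true_or, if_true]
        exact pv_getD_setD_self row q _ 0 hj0 hjrow
      · simp [hqnL, hcq]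
    · have hget : PySem.List.pyGetD (if cond j then PySem.List.pySetD row j (h (PySem.List.pyGetD row j 0)) else row) q 0 = PySem.List.pyGetD row q 0 := by
        split
        · exact pv_getD_setD_ne row j q _ 0 hj0 hq0 (by omega) (fun hh => hqj hh.symm)
        · rfl
      rw [hget]
      have : (q ∈ j :: L') ↔ (q ∈ L') := by simp [hqj]
      simp [this]

theorem pv_mod_stack (a b : Int) :
    PySem.Int.mod (PySem.Int.mod a pvMOD + b) pvMOD = PySem.Int.mod (a + b) pvMOD := by
  rw [PySem.Int.mod_eq_emod_of_pos (by norm_num [pvMOD]),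
    PySem.Int.mod_eq_emod_of_pos (by norm_num [pvMOD]),
    PySem.Int.mod_eq_emod_of_pos (by norm_num [pvMOD])]
  unfold pvMOD
  omega

def pvSumC (prev L : List Int) (q : Int) : Int :=
  ((L.filter (fun p => decide (PySem.Int.band p q ≠ 0))).map
    (fun p => PySem.List.pyGetD prev p 0)).sum

theorem pvSumC_cons (prev L : List Int) (a q : Int) :
    pvSumC prev (a :: L) q
      = (if PySem.Int.band a q ≠ 0 then PySem.List.pyGetD prev a 0 else 0) + pvSumC prev L q := by
  simp only [pvSumC, List.filter_cons]
  split_ifs with h1 h2 h3 <;> simp_all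

theorem pv_jL_bounds : ∀ x ∈ PySem.List.pyRange 1 16 1, 0 ≤ x ∧ x < 16 := by
  intro x hx
  have := (PySem.List.mem_pyRange_one).mp hx
  omega

theorem pv_setD_setD {α : Type} (xs : List α) (i : Int) (v w : α) (hi : 0 ≤ i) :
    PySem.List.pySetD (PySem.List.pySetD xs i v) i w = PySem.List.pySetD xs i w := by
  rw [PySem.List.pySetD_of_nonneg xs v hi, PySem.List.pySetD_of_nonneg _ w hi,
    PySem.List.pySetD_of_nonneg xs w hi, List.set_set]
theorem pv_setD_self_get {α : Type} (xs : List α) (i : Int) (d : α)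
    (hi : 0 ≤ i) (hil : i < xs.length) :
    PySem.List.pySetD xs i (PySem.List.pyGetD xs i d) = xs := by
  rw [PySem.List.pyGetD_eq_getElem xs d hi (by simpa using hil),
    PySem.List.pySetD_of_nonneg xs _ hi]
  exact List.set_getElem_self (by omega)

theorem pv_rowFold_bits (prev : List Int) (master : Int) :
    ∀ (Lb : List Int), (∀ x ∈ Lb, 0 ≤ x ∧ x < 16) →
      ∀ (row : List Int) (C : Int → Int), row.length = 16 →
      (∀ q : Int, 0 ≤ q → q < 16 →
        PySem.List.pyGetD row q 0
          = if 1 ≤ q ∧ PySem.Int.band q master ≠ 0 then PySem.Int.mod (C q) pvMOD else 0) →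
      (Lb.foldl (fun r bit =>
        if PySem.List.pyGetD prev bit 0 ≠ 0 then
          (PySem.List.pyRange 1 16 1).foldl (fun r j =>
            if PySem.Int.band bit j ≠ 0 ∧ PySem.Int.band j master ≠ 0 then
              PySem.List.pySetD r j
                (PySem.Int.mod (PySem.List.pyGetD r j 0 + PySem.List.pyGetD prev bit 0) pvMOD)
            else r) r
        else r) row).length = 16 ∧
      ∀ q : Int, 0 ≤ q → q < 16 →
        PySem.List.pyGetD (Lb.foldl (fun r bit =>
          if PySem.List.pyGetD prev bit 0 ≠ 0 then
            (PySem.List.pyRange 1 16 1).foldl (fun r j =>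
              if PySem.Int.band bit j ≠ 0 ∧ PySem.Int.band j master ≠ 0 then
                PySem.List.pySetD r j
                  (PySem.Int.mod (PySem.List.pyGetD r j 0 + PySem.List.pyGetD prev bit 0) pvMOD)
              else r) r
          else r) row) q 0
        = if 1 ≤ q ∧ PySem.Int.band q master ≠ 0 then
            PySem.Int.mod (C q + pvSumC prev Lb q) pvMOD
          else 0 := by
  intro Lb
  induction Lb with
  | nil =>
    intro _ row C hlen hrow
    refine ⟨hlen, ?_⟩
    intro q hq0 hq16
    simp only [List.foldl_nil, pvSumC, List.filter_nil, List.map_nil, List.sum_nil, add_zero]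
    exact hrow q hq0 hq16
  | cons a L' ih =>
    intro hR row C hlen hrow
    obtain ⟨ha0, ha16⟩ := hR a (by simp)
    simp only [List.foldl_cons]
    by_cases hv : PySem.List.pyGetD prev a 0 ≠ 0
    · rw [if_pos hv]
      obtain ⟨hlen1, hent1⟩ := pv_rowFold_set
        (fun j => PySem.Int.band a j ≠ 0 ∧ PySem.Int.band j master ≠ 0)
        (fun x => PySem.Int.mod (x + PySem.List.pyGetD prev a 0) pvMOD)
        (PySem.List.pyRange 1 16 1) (PySem.List.nodup_pyRange_one 1 16) pv_jL_bounds row hlen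
      have hinv : ∀ q : Int, 0 ≤ q → q < 16 →
          PySem.List.pyGetD
            ((PySem.List.pyRange 1 16 1).foldl (fun r j =>
              if PySem.Int.band a j ≠ 0 ∧ PySem.Int.band j master ≠ 0 then
                PySem.List.pySetD r j
                  (PySem.Int.mod (PySem.List.pyGetD r j 0 + PySem.List.pyGetD prev a 0) pvMOD)
              else r) row) q 0
          = if 1 ≤ q ∧ PySem.Int.band q master ≠ 0 then
              PySem.Int.mod (C q + (if PySem.Int.band a q ≠ 0 then PySem.List.pyGetD prev a 0 else 0)) pvMOD
            else 0 := by
        intro q hq0 hq16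
        rw [hent1 q hq0 hq16]
        have hmem : (q ∈ PySem.List.pyRange 1 16 1) ↔ (1 ≤ q) := by
          rw [PySem.List.mem_pyRange_one]; omega
        by_cases h1q : 1 ≤ q
        · by_cases hqm : PySem.Int.band q master ≠ 0
          · by_cases haq : PySem.Int.band a q ≠ 0
            · rw [if_pos ⟨hmem.mpr h1q, haq, hqm⟩, hrow q hq0 hq16,
                if_pos ⟨h1q, hqm⟩, if_pos ⟨h1q, hqm⟩, if_pos haq, pv_mod_stack]
            · rw [if_neg (by tauto), hrow q hq0 hq16, if_pos ⟨h1q, hqm⟩,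
                if_pos ⟨h1q, hqm⟩, if_neg haq, add_zero]
          · rw [if_neg (by tauto), hrow q hq0 hq16, if_neg (by tauto), if_neg (by tauto)]
        · rw [if_neg (by rw [hmem] at *; tauto), hrow q hq0 hq16,
            if_neg (by tauto), if_neg (by tauto)]
      obtain ⟨ihL, ihE⟩ := ih (fun x hx => hR x (by simp [hx])) _
        (fun q => C q + (if PySem.Int.band a q ≠ 0 then PySem.List.pyGetD prev a 0 else 0))
        hlen1 hinv
      refine ⟨ihL, ?_⟩
      intro q hq0 hq16
      rw [ihE q hq0 hq16]
      by_cases hc : 1 ≤ q ∧ PySem.Int.band q master ≠ 0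
      · rw [if_pos hc, if_pos hc, pvSumC_cons]
        by_cases hb : PySem.Int.band a q ≠ 0
        · ring
        · ring
      · rw [if_neg hc, if_neg hc]
    · rw [if_neg hv]
      obtain ⟨ihL, ihE⟩ := ih (fun x hx => hR x (by simp [hx])) row C hlen hrow
      refine ⟨ihL, ?_⟩
      intro q hq0 hq16
      rw [ihE q hq0 hq16]
      by_cases hc : 1 ≤ q ∧ PySem.Int.band q master ≠ 0
      · rw [if_pos hc, if_pos hc, pvSumC_cons]
        have hv0 : PySem.List.pyGetD prev a 0 = 0 := not_ne_iff.mp hv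
        rw [hv0]
        split_ifs <;> ring
      · rw [if_neg hc, if_neg hc]


def pvRowSpec (masters : List Int) (d : Nat) : List Int :=
  (List.range 16).map (fun (q : Nat) => fB masters d (q : Int))

theorem pv_rowSpec_len (masters : List Int) (d : Nat) : (pvRowSpec masters d).length = 16 := by
  simp [pvRowSpec]

theorem pv_rowSpec_get (masters : List Int) (d : Nat) (p : Int) (h0 : 0 ≤ p) (h1 : p < 16) :
    PySem.List.pyGetD (pvRowSpec masters d) p 0 = fB masters d p := by
  rw [PySem.List.pyGetD_eq_getElem _ 0 h0 (by rw [pv_rowSpec_len]; omega)]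
  unfold pvRowSpec
  simp only [List.getElem_map, List.getElem_range]
  rw [Int.toNat_of_nonneg h0]

theorem pv_band_zero_left (m : Int) : PySem.Int.band 0 m = 0 := by
  rw [PySem.Int.band_comm]; exact PySem.Int.band_zero m

theorem pv_mod_zero : PySem.Int.mod 0 pvMOD = 0 := by decide

theorem pv_replicate_get (q : Int) (h0 : 0 ≤ q) (h1 : q < 16) :
    PySem.List.pyGetD (List.replicate 16 (0:Int)) q 0 = 0 := by
  rw [PySem.List.pyGetD_eq_getElem _ 0 h0 (by rw [List.length_replicate]; omega)]
  rw [List.getElem_replicate]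

theorem pv_getElem_eq_pyGetD (xs : List Int) (i : Nat) (h : i < xs.length) :
    xs[i] = PySem.List.pyGetD xs (i : Int) 0 := by
  rw [PySem.List.pyGetD_eq_getElem _ 0 (Int.natCast_nonneg i) (by exact_mod_cast h)]
  simp

theorem pv_day0_row (masters : List Int) (master : Int) (hm : master = masters.getD 0 0) :
    (PySem.List.pyRange 1 16 1).foldl (fun r bit =>
        if PySem.Int.band bit master ≠ 0 ∧ PySem.Int.band bit 1 ≠ 0 then
          PySem.List.pySetD r bit 1 else r) (List.replicate 16 0)
      = pvRowSpec masters 0 := by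
  obtain ⟨hlenr, hentr⟩ := pv_rowFold_set
    (fun bit => PySem.Int.band bit master ≠ 0 ∧ PySem.Int.band bit 1 ≠ 0)
    (fun _ => 1) (PySem.List.pyRange 1 16 1) (PySem.List.nodup_pyRange_one 1 16)
    pv_jL_bounds (List.replicate 16 0) (by simp)
  apply List.ext_getElem (by rw [hlenr, pv_rowSpec_len])
  intro i hi1 hi2
  have hi16 : i < 16 := by rw [hlenr] at hi1; exact hi1
  have hc0 : (0:Int) ≤ (i:Int) := Int.natCast_nonneg i
  have hc16 : (i:Int) < 16 := by exact_mod_cast hi16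
  rw [pv_getElem_eq_pyGetD _ i hi1, hentr (i:Int) hc0 hc16,
      pv_getElem_eq_pyGetD _ i hi2, pv_rowSpec_get masters 0 (i:Int) hc0 hc16,
      pv_replicate_get (i:Int) hc0 hc16]
  by_cases hi0 : i = 0
  · subst hi0
    have hnm : ¬ (((0:Nat):Int) ∈ PySem.List.pyRange 1 16 1) := by
      simp [PySem.List.mem_pyRange_one]
    rw [if_neg (by tauto)]
    show (0:Int) = fB masters 0 ((0:Nat):Int)
    norm_num [fB, pv_band_zero_left]
  · have hmem : (i:Int) ∈ PySem.List.pyRange 1 16 1 := by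
      rw [PySem.List.mem_pyRange_one]
      constructor
      · omega
      · exact hc16
    show _ = fB masters 0 (i:Int)
    simp only [fB, ← hm]
    split_ifs <;> tauto

theorem pv_day_succ_row (masters : List Int) (d : Nat) (master : Int)
    (hm : master = masters.getD (d + 1) 0) :
    (PySem.List.pyRange 1 16 1).foldl (fun r bit =>
      if PySem.List.pyGetD (pvRowSpec masters d) bit 0 ≠ 0 then
        (PySem.List.pyRange 1 16 1).foldl (fun r j =>
          if PySem.Int.band bit j ≠ 0 ∧ PySem.Int.band j master ≠ 0 then
            PySem.List.pySetD r j
              (PySem.Int.mod (PySem.List.pyGetD r j 0 + PySem.List.pyGetD (pvRowSpec masters d) bit 0) pvMOD)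
          else r) r
      else r) (List.replicate 16 0)
    = pvRowSpec masters (d + 1) := by
  obtain ⟨hlenr, hentr⟩ := pv_rowFold_bits (pvRowSpec masters d) master
    (PySem.List.pyRange 1 16 1) pv_jL_bounds (List.replicate 16 0) (fun _ => 0)
    (by simp)
    (by
      intro q hq0 hq16
      rw [pv_replicate_get q hq0 hq16, pv_mod_zero]
      split_ifs <;> rfl)
  apply List.ext_getElem (by rw [hlenr, pv_rowSpec_len])
  intro i hi1 hi2
  have hi16 : i < 16 := by rw [hlenr] at hi1; exact hi1
  have hc0 : (0:Int) ≤ (i:Int) := Int.natCast_nonneg i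
  have hc16 : (i:Int) < 16 := by exact_mod_cast hi16
  rw [pv_getElem_eq_pyGetD _ i hi1, hentr (i:Int) hc0 hc16,
      pv_getElem_eq_pyGetD _ i hi2, pv_rowSpec_get masters (d+1) (i:Int) hc0 hc16]
  have hsum : pvSumC (pvRowSpec masters d) (PySem.List.pyRange 1 16 1) (i:Int)
      = (((PySem.List.pyRange 1 16 1).filter
          (fun p => decide (PySem.Int.band p (i:Int) ≠ 0))).map (fB masters d)).sum := by
    unfold pvSumC
    congr 1
    apply List.map_congr_left
    intro p hp
    have hpj := pv_jL_bounds p (List.mem_filter.mp hp).1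
    exact pv_rowSpec_get masters d p hpj.1 hpj.2
  by_cases hi0 : i = 0
  · subst hi0
    rw [if_neg (by push_cast; rintro ⟨h1, -⟩; omega)]
    show (0:Int) = fB masters (d+1) ((0:Nat):Int)
    norm_num [fB, pv_band_zero_left]
  · have h1i : 1 ≤ (i:Int) := by omega
    show _ = fB masters (d+1) (i:Int)
    simp only [fB, ← hm]
    by_cases hbm : PySem.Int.band (i:Int) master = 0
    · rw [if_neg (by tauto), if_pos hbm]
    · rw [if_pos ⟨h1i, hbm⟩, if_neg hbm, hsum, zero_add]

theorem pv_liftInner (dp0 : List (List Int)) (day bit master : Int)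
    (h1 : 1 ≤ day) (h2 : day < dp0.length) :
    ∀ (L : List Int) (r : List Int),
      L.foldl (fun dp j =>
          if PySem.Int.band bit j ≠ 0 ∧ PySem.Int.band j master ≠ 0 then
            pvSet2 dp day j (PySem.Int.mod (pvGet2 dp day j + pvGet2 dp (day - 1) bit) pvMOD)
          else dp) (PySem.List.pySetD dp0 day r)
      = PySem.List.pySetD dp0 day (L.foldl (fun r j =>
          if PySem.Int.band bit j ≠ 0 ∧ PySem.Int.band j master ≠ 0 then
            PySem.List.pySetD r j
              (PySem.Int.mod (PySem.List.pyGetD r j 0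
                + PySem.List.pyGetD (PySem.List.pyGetD dp0 (day - 1) []) bit 0) pvMOD)
          else r) r) := by
  intro L
  induction L with
  | nil => intro r; simp
  | cons j L' ih =>
    intro r
    simp only [List.foldl_cons]
    have e1 : PySem.List.pyGetD (PySem.List.pySetD dp0 day r) day [] = r :=
      pv_getD_setD_self dp0 day r [] (by omega) h2
    have e2 : PySem.List.pyGetD (PySem.List.pySetD dp0 day r) (day - 1) []
        = PySem.List.pyGetD dp0 (day - 1) [] :=
      pv_getD_setD_ne dp0 day (day - 1) r [] (by omega) (by omega) (by omega) (by omega)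
    by_cases hc : PySem.Int.band bit j ≠ 0 ∧ PySem.Int.band j master ≠ 0
    · rw [if_pos hc, if_pos hc]
      have estep : pvSet2 (PySem.List.pySetD dp0 day r) day j
          (PySem.Int.mod (pvGet2 (PySem.List.pySetD dp0 day r) day j
            + pvGet2 (PySem.List.pySetD dp0 day r) (day - 1) bit) pvMOD)
          = PySem.List.pySetD dp0 day (PySem.List.pySetD r j
              (PySem.Int.mod (PySem.List.pyGetD r j 0
                + PySem.List.pyGetD (PySem.List.pyGetD dp0 (day - 1) []) bit 0) pvMOD)) := by
        unfold pvSet2 pvGet2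
        rw [e1, e2, pv_setD_setD dp0 day _ _ (by omega)]
      rw [estep, ih]
    · rw [if_neg hc, if_neg hc]
      exact ih r

theorem pv_liftDay (dp0 : List (List Int)) (day master : Int)
    (h1 : 1 ≤ day) (h2 : day < dp0.length) :
    ∀ (Lb : List Int) (r : List Int),
      Lb.foldl (fun dp bit =>
          if pvGet2 dp (day - 1) bit ≠ 0 then
            (PySem.List.pyRange 1 16 1).foldl (fun dp j =>
              if PySem.Int.band bit j ≠ 0 ∧ PySem.Int.band j master ≠ 0 then
                pvSet2 dp day j (PySem.Int.mod (pvGet2 dp day j + pvGet2 dp (day - 1) bit) pvMOD)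
              else dp) dp
          else dp) (PySem.List.pySetD dp0 day r)
      = PySem.List.pySetD dp0 day (Lb.foldl (fun r bit =>
          if PySem.List.pyGetD (PySem.List.pyGetD dp0 (day - 1) []) bit 0 ≠ 0 then
            (PySem.List.pyRange 1 16 1).foldl (fun r j =>
              if PySem.Int.band bit j ≠ 0 ∧ PySem.Int.band j master ≠ 0 then
                PySem.List.pySetD r j
                  (PySem.Int.mod (PySem.List.pyGetD r j 0
                    + PySem.List.pyGetD (PySem.List.pyGetD dp0 (day - 1) []) bit 0) pvMOD)
              else r) r
          else r) r) := by
  intro Lb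
  induction Lb with
  | nil => intro r; simp
  | cons a Lb' ih =>
    intro r
    simp only [List.foldl_cons]
    have e2 : PySem.List.pyGetD (PySem.List.pySetD dp0 day r) (day - 1) []
        = PySem.List.pyGetD dp0 (day - 1) [] :=
      pv_getD_setD_ne dp0 day (day - 1) r [] (by omega) (by omega) (by omega) (by omega)
    have egc : pvGet2 (PySem.List.pySetD dp0 day r) (day - 1) a
        = PySem.List.pyGetD (PySem.List.pyGetD dp0 (day - 1) []) a 0 := by
      unfold pvGet2; rw [e2]
    by_cases hc : PySem.List.pyGetD (PySem.List.pyGetD dp0 (day - 1) []) a 0 ≠ 0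
    · rw [if_pos (by rw [egc]; exact hc), if_pos hc, pv_liftInner dp0 day a master h1 h2, ih]
    · rw [if_neg (by rw [egc]; exact hc), if_neg hc]
      exact ih r

theorem pv_liftDay0 (dp0 : List (List Int)) (master : Int) (h2 : (0:Int) < dp0.length) :
    ∀ (Lb : List Int) (r : List Int),
      Lb.foldl (fun dp bit =>
          if PySem.Int.band bit master ≠ 0 ∧ PySem.Int.band bit 1 ≠ 0 then
            pvSet2 dp 0 bit 1 else dp) (PySem.List.pySetD dp0 0 r)
      = PySem.List.pySetD dp0 0 (Lb.foldl (fun r bit =>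
          if PySem.Int.band bit master ≠ 0 ∧ PySem.Int.band bit 1 ≠ 0 then
            PySem.List.pySetD r bit 1 else r) r) := by
  intro Lb
  induction Lb with
  | nil => intro r; simp
  | cons a Lb' ih =>
    intro r
    simp only [List.foldl_cons]
    have e1 : PySem.List.pyGetD (PySem.List.pySetD dp0 0 r) 0 [] = r :=
      pv_getD_setD_self dp0 0 r [] (by omega) h2
    by_cases hc : PySem.Int.band a master ≠ 0 ∧ PySem.Int.band a 1 ≠ 0
    · rw [if_pos hc, if_pos hc]
      have estep : pvSet2 (PySem.List.pySetD dp0 0 r) 0 a 1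
          = PySem.List.pySetD dp0 0 (PySem.List.pySetD r a 1) := by
        unfold pvSet2
        rw [e1, pv_setD_setD dp0 0 _ _ (by omega)]
      rw [estep, ih]
    · rw [if_neg hc, if_neg hc]
      exact ih r

def pvDPk (masters : List Int) (n k : Nat) : List (List Int) :=
  (List.range n).map (fun d => if d < k then pvRowSpec masters d else List.replicate 16 0)

theorem pvDPk_len (masters : List Int) (n k : Nat) : (pvDPk masters n k).length = n := by
  simp [pvDPk]

theorem pvDPk_get (masters : List Int) (n k d : Nat) (hd : d < n) :
    PySem.List.pyGetD (pvDPk masters n k) (d : Int) []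
      = if d < k then pvRowSpec masters d else List.replicate 16 0 := by
  rw [PySem.List.pyGetD_eq_getElem _ [] (Int.natCast_nonneg d)
    (by rw [pvDPk_len]; exact_mod_cast hd)]
  simp [pvDPk]

theorem pvDPk_zero (masters : List Int) (n : Nat) :
    pvDPk masters n 0 = List.replicate n (List.replicate 16 0) := by
  simp [pvDPk]

theorem pvDPk_set (masters : List Int) (n k : Nat) (hk : k < n) :
    PySem.List.pySetD (pvDPk masters n k) (k : Int) (pvRowSpec masters k)
      = pvDPk masters n (k + 1) := by
  rw [PySem.List.pySetD_of_nonneg _ _ (Int.natCast_nonneg k)]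
  apply List.ext_getElem (by simp [pvDPk])
  intro i hi1 hi2
  rw [List.getElem_set]
  simp only [pvDPk, List.getElem_map, List.getElem_range]
  have hin : i < n := by simp [pvDPk] at hi2; exact hi2
  by_cases hik : i = k
  · subst hik
    rw [if_pos (by simp), if_pos (by omega)]
  · rw [if_neg (by simp; omega)]
    by_cases hlt : i < k
    · rw [if_pos hlt, if_pos (by omega)]
    · rw [if_neg hlt, if_neg (by omega)]

theorem pv_dayFold (schedule : List String) (masters : List Int)
    (hmast : masters = schedule.map (fun ch =>
      (PySem.Dict.ofList [("A", (1:Int)), ("B", 2), ("C", 4), ("D", 8)]).getD ch 0)) :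
    ∀ (k : Nat), k ≤ schedule.length →
      (PySem.List.pyRange 0 (k : Int) 1).foldl (fun dp day =>
        let master : Int :=
          (PySem.Dict.ofList [("A", (1:Int)), ("B", 2), ("C", 4), ("D", 8)]).getD
            (PySem.List.pyGetD schedule day "") 0
        (PySem.List.pyRange 1 16 1).foldl (fun dp bit =>
          if day = 0 then
            if PySem.Int.band bit master ≠ 0 ∧ PySem.Int.band bit 1 ≠ 0 then
              pvSet2 dp day bit 1
            else dp
          else
            if pvGet2 dp (day - 1) bit ≠ 0 then
              (PySem.List.pyRange 1 16 1).foldl (fun dp j =>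
                if PySem.Int.band bit j ≠ 0 ∧ PySem.Int.band j master ≠ 0 then
                  pvSet2 dp day j (PySem.Int.mod (pvGet2 dp day j + pvGet2 dp (day - 1) bit) pvMOD)
                else dp) dp
            else dp) dp)
        (List.replicate schedule.length (List.replicate 16 0))
      = pvDPk masters schedule.length k := by
  intro k
  induction k with
  | zero =>
    intro _
    rw [show PySem.List.pyRange 0 ((0:Nat):Int) 1 = [] from
      PySem.List.pyRange_one_eq_nil (by norm_num)]
    rw [List.foldl_nil, pvDPk_zero]
  | succ s ihs =>
    intro hk1
    have hs : s ≤ schedule.length := by omega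
    have hslt : s < schedule.length := by omega
    have hcast : ((s + 1 : Nat) : Int) = (s : Int) + 1 := by push_cast; ring
    rw [hcast, show PySem.List.pyRange 0 ((s:Int)+1) 1
        = PySem.List.pyRange 0 (s:Int) 1 ++ [(s:Int)] from
      PySem.List.pyRange_one_succ_right (by positivity), List.foldl_append,
      ihs hs, List.foldl_cons, List.foldl_nil]
    -- the single day step at day = s
    have hmval : (PySem.Dict.ofList [("A", (1:Int)), ("B", 2), ("C", 4), ("D", 8)]).getD
        (PySem.List.pyGetD schedule (s : Int) "") 0 = masters.getD s 0 := by
      rw [hmast]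
      rw [PySem.List.pyGetD_natCast]
      rw [List.getD_eq_getElem _ _ (by simpa using hslt),
        List.getD_eq_getElem _ _ (by simpa using hslt), List.getElem_map]
    simp only [hmval]
    cases s with
    | zero =>
      have hstart : pvDPk masters schedule.length 0
          = PySem.List.pySetD (pvDPk masters schedule.length 0) ((0:Nat):Int)
              (List.replicate 16 0) := by
        nth_rewrite 1 [← pv_setD_self_get (pvDPk masters schedule.length 0) ((0:Nat):Int) []
          (by norm_num) (by rw [pvDPk_len]; exact_mod_cast hslt)]
        rw [pvDPk_get masters schedule.length 0 0 hslt]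
        simp
      simp only [Nat.cast_zero]
      simp only [if_true]
      rw [hstart]
      simp only [Nat.cast_zero]
      rw [pv_liftDay0 (pvDPk masters schedule.length 0) (masters.getD 0 0)
        (by rw [pvDPk_len]; exact_mod_cast hslt) (PySem.List.pyRange 1 16 1)
        (List.replicate 16 0)]
      rw [pv_day0_row masters (masters.getD 0 0) rfl]
      have := pvDPk_set masters schedule.length 0 hslt
      simpa using this
    | succ t =>
      have hne : (((t + 1 : Nat) : Int) = 0) = False := by
        simp; omega
      simp only [hne, if_false]
      have hstart : pvDPk masters schedule.length (t + 1)
          = PySem.List.pySetD (pvDPk masters schedule.length (t + 1)) (((t + 1 : Nat)):Int)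
              (List.replicate 16 0) := by
        nth_rewrite 1 [← pv_setD_self_get (pvDPk masters schedule.length (t + 1)) (((t+1:Nat)):Int) []
          (by positivity) (by rw [pvDPk_len]; exact_mod_cast hslt)]
        rw [pvDPk_get masters schedule.length (t + 1) (t + 1) hslt]
        simp
      rw [hstart]
      rw [pv_liftDay (pvDPk masters schedule.length (t + 1)) (((t+1:Nat)):Int)
        (masters.getD (t + 1) 0) (by push_cast; omega)
        (by rw [pvDPk_len]; exact_mod_cast hslt) (PySem.List.pyRange 1 16 1)
        (List.replicate 16 0)]
      have hprev : PySem.List.pyGetD (pvDPk masters schedule.length (t + 1))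
          ((((t + 1 : Nat)):Int) - 1) [] = pvRowSpec masters t := by
        have : (((t + 1 : Nat)):Int) - 1 = ((t : Nat) : Int) := by push_cast; ring
        rw [this, pvDPk_get masters schedule.length (t + 1) t (by omega)]
        rw [if_pos (by omega)]
      rw [hprev]
      rw [pv_day_succ_row masters t (masters.getD (t + 1) 0) rfl]
      exact pvDPk_set masters schedule.length (t + 1) hslt


-- ===== VERDICT (by name: the statement is the Claim_ definition above) =====
theorem calculate_spec : Claim_equal_calculate := by
  intro schedule _hdom hpre
  unfold Spec_calculate
  obtain ⟨hne, _⟩ := hpre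
  have hn1 : 1 ≤ schedule.length := by
    cases schedule with
    | nil => exact absurd rfl hne
    | cons a t => simp
  have hA : calculate schedule
      = PySem.Int.mod (PySem.List.slice
          (PySem.List.pyGetD
            (pvDPk (schedule.map (fun ch =>
              (PySem.Dict.ofList [("A", (1:Int)), ("B", 2), ("C", 4), ("D", 8)]).getD ch 0))
              schedule.length schedule.length)
            ((schedule.length : Int) - 1) []) (some 1) none).sum pvMOD := by
    unfold calculate
    simp only [PySem.List.len_eq, Int.toNat_natCast]
    rw [pv_dayFold schedule _ rfl schedule.length le_rfl]
  have hrow : PySem.List.pyGetD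
      (pvDPk (schedule.map (fun ch =>
        (PySem.Dict.ofList [("A", (1:Int)), ("B", 2), ("C", 4), ("D", 8)]).getD ch 0))
        schedule.length schedule.length)
      ((schedule.length : Int) - 1) []
      = pvRowSpec (schedule.map (fun ch =>
          (PySem.Dict.ofList [("A", (1:Int)), ("B", 2), ("C", 4), ("D", 8)]).getD ch 0))
          (schedule.length - 1) := by
    have hc : (schedule.length : Int) - 1 = ((schedule.length - 1 : Nat) : Int) := by
      push_cast [hn1]; ring
    rw [hc, pvDPk_get _ schedule.length schedule.length (schedule.length - 1) (by omega)]
    rw [if_pos (by omega)]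
  have htail : (pvRowSpec (schedule.map (fun ch =>
        (PySem.Dict.ofList [("A", (1:Int)), ("B", 2), ("C", 4), ("D", 8)]).getD ch 0))
        (schedule.length - 1)).tail
      = (PySem.List.pyRange 1 16 1).map (fun j => fB (schedule.map (fun ch =>
          (PySem.Dict.ofList [("A", (1:Int)), ("B", 2), ("C", 4), ("D", 8)]).getD ch 0))
          (schedule.length - 1) j) := by
    have hpR : PySem.List.pyRange 1 16 1
        = [1, 2, 3, 4, 5, 6, 7, 8, 9, 10, 11, 12, 13, 14, 15] := by decide
    have hr16 : List.range 16 = [0, 1, 2, 3, 4, 5, 6, 7, 8, 9, 10, 11, 12, 13, 14, 15] := rfl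
    rw [pvRowSpec, hpR, hr16]
    simp
  have hB : calculate_alt schedule
      = PySem.Int.mod ((PySem.List.pyRange 1 16 1).map (fun j => fB (schedule.map (fun ch =>
          (PySem.Dict.ofList [("A", (1:Int)), ("B", 2), ("C", 4), ("D", 8)]).getD ch 0))
          (schedule.length - 1) j)).sum pvMOD := by
    unfold calculate_alt
    rw [if_neg (by simpa [List.isEmpty_iff] using hne)]
  rw [hA, hB, hrow, PySem.List.slice_from_one, htail]
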